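-- pv_equiv track=rewrite | github.com/lofaldli/advent-of-code | 2022/day24.py | parse
-- ===== SOURCE A (Python) =====
-- import collections
--
-- Blizzard = collections.namedtuple('Blizzard', 'pos direction')
--
-- def parse(data):
--     def blizzards():
--         for y, line in enumerate(data.splitlines()):
--             for x, cell in enumerate(line):
--                 if cell in '^v<>':
--                     yield Blizzard((x,y), cell)
--
--     def walls():
--         for y, line in enumerate(data.splitlines()):
--             for x, cell in enumerate(line):
--                 if cell == '#':
--                     yield x, y
--
--     return frozenset(blizzards()), frozenset(walls())
-- ===== SOURCE B (Python) =====
-- import collections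
--
-- Blizzard = collections.namedtuple('Blizzard', 'pos direction')
--
-- def parse(data):
--     blizz = []
--     wall = []
--     for y, line in enumerate(data.splitlines()):
--         for x, cell in enumerate(line):
--             if cell in '^v<>':
--                 blizz.append(Blizzard((x, y), cell))
--             elif cell == '#':
--                 wall.append((x, y))
--     return frozenset(blizz), frozenset(wall)
-- ===== Notes on version B (the rewrite author's own statement) =====
-- stated objective: simpler
-- what changed: B scans the grid once with explicit blizzard/wall accumulators instead of A's two separate generator passes over data.splitlines().
import Mathlib
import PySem

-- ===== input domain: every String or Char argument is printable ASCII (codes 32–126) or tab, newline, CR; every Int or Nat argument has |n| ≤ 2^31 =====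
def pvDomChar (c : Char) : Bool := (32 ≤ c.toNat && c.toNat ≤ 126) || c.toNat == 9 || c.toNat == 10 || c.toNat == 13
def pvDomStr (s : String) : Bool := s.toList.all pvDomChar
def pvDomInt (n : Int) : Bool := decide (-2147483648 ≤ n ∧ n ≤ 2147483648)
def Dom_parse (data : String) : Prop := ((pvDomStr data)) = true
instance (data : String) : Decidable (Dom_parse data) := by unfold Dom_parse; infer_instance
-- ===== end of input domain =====

-- B merges A's two generator passes over the grid into one scan with two accumulators (objective: simpler, same cost).

-- ===== PORT A =====
-- 'cell in "^v<>"' for a single character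
def pvIsArrow (c : Char) : Bool := c == '^' || c == 'v' || c == '<' || c == '>'

-- generator blizzards(): nested scan, yields only arrow cells
def pvBlizzardsA (data : String) : List ((Int × Int) × String) :=
  (PySem.List.enumerate (PySem.Str.splitlines data)).foldl
    (fun acc yl =>
      (PySem.List.enumerate yl.2.toList).foldl
        (fun acc xc =>
          if pvIsArrow xc.2 then acc ++ [((xc.1, yl.1), String.ofList [xc.2])] else acc)
        acc)
    []

-- generator walls(): a second full nested scan, yields only '#' cells
def pvWallsA (data : String) : List (Int × Int) :=
  (PySem.List.enumerate (PySem.Str.splitlines data)).foldl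
    (fun acc yl =>
      (PySem.List.enumerate yl.2.toList).foldl
        (fun acc xc =>
          if xc.2 == '#' then acc ++ [(xc.1, yl.1)] else acc)
        acc)
    []

def parse (data : String) : (List ((Int × Int) × String)) × (List (Int × Int)) :=
  (PySem.Set.ofList (pvBlizzardsA data), PySem.Set.ofList (pvWallsA data))

-- ===== PORT B =====
-- one scan of the grid carrying both accumulators; frozenset(...) at the end
def parse_alt (data : String) : (List ((Int × Int) × String)) × (List (Int × Int)) :=
  let p :=
    (PySem.List.enumerate (PySem.Str.splitlines data)).foldl
      (fun acc yl =>
        (PySem.List.enumerate yl.2.toList).foldl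
          (fun acc xc =>
            if pvIsArrow xc.2 then (acc.1 ++ [((xc.1, yl.1), String.ofList [xc.2])], acc.2)
            else if xc.2 == '#' then (acc.1, acc.2 ++ [(xc.1, yl.1)])
            else acc)
          acc)
      ([], [])
  (PySem.Set.ofList p.1, PySem.Set.ofList p.2)

-- ===== PRECONDITION & SPEC =====
def Spec_parse (data : String) (out : (List ((Int × Int) × String)) × (List (Int × Int))) : Prop := out = parse_alt data
instance (data : String) (out : (List ((Int × Int) × String)) × (List (Int × Int))) : Decidable (Spec_parse data out) := by unfold Spec_parse; infer_instance

-- ===== CLAIM (what is proved, stated in full; the proofs are below) =====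
def Claim_equal_parse : Prop := ∀ (data : String), Dom_parse data → Spec_parse data (parse data)

-- ===== LEMMAS AND PROOFS =====

-- a cell is never both an arrow and '#'
lemma pv_not_arrow_hash {c : Char} (h : pvIsArrow c = true) : (c == '#') = false := by
  simp only [pvIsArrow, Bool.or_eq_true, beq_iff_eq] at h
  rcases h with ((h | h) | h) | h <;> subst h <;> decide

-- the combined inner fold computes both one-purpose inner folds
lemma pv_inner (y : Int) (l : List (Int × Char))
    (b : List ((Int × Int) × String)) (w : List (Int × Int)) :
    l.foldl
      (fun acc xc =>
        if pvIsArrow xc.2 then (acc.1 ++ [((xc.1, y), String.ofList [xc.2])], acc.2)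
        else if xc.2 == '#' then (acc.1, acc.2 ++ [(xc.1, y)])
        else acc)
      (b, w)
    = (l.foldl (fun acc xc =>
          if pvIsArrow xc.2 then acc ++ [((xc.1, y), String.ofList [xc.2])] else acc) b,
       l.foldl (fun acc xc =>
          if xc.2 == '#' then acc ++ [(xc.1, y)] else acc) w) := by
  induction l generalizing b w with
  | nil => rfl
  | cons hd tl ih =>
    simp only [List.foldl_cons]
    by_cases ha : pvIsArrow hd.2 = true
    · rw [if_pos ha, if_pos ha,
        if_neg (by rw [pv_not_arrow_hash ha]; exact Bool.false_ne_true), ih]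
    · rw [if_neg ha, if_neg ha]
      by_cases hh : (hd.2 == '#') = true
      · rw [if_pos hh, if_pos hh, ih]
      · rw [if_neg hh, if_neg hh, ih]

-- the combined outer fold computes both one-purpose outer folds
lemma pv_outer (ls : List (Int × String))
    (b : List ((Int × Int) × String)) (w : List (Int × Int)) :
    ls.foldl
      (fun acc yl =>
        (PySem.List.enumerate yl.2.toList).foldl
          (fun acc xc =>
            if pvIsArrow xc.2 then (acc.1 ++ [((xc.1, yl.1), String.ofList [xc.2])], acc.2)
            else if xc.2 == '#' then (acc.1, acc.2 ++ [(xc.1, yl.1)])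
            else acc)
          acc)
      (b, w)
    = (ls.foldl (fun acc yl =>
          (PySem.List.enumerate yl.2.toList).foldl
            (fun acc xc =>
              if pvIsArrow xc.2 then acc ++ [((xc.1, yl.1), String.ofList [xc.2])] else acc)
            acc) b,
       ls.foldl (fun acc yl =>
          (PySem.List.enumerate yl.2.toList).foldl
            (fun acc xc =>
              if xc.2 == '#' then acc ++ [(xc.1, yl.1)] else acc)
            acc) w) := by
  induction ls generalizing b w with
  | nil => rfl
  | cons hd tl ih =>
    simp only [List.foldl_cons, pv_inner, ih]

-- ===== VERDICT (by name: the statement is the Claim_ definition above) =====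
theorem parse_spec : Claim_equal_parse := by
  intro data _
  show parse data = parse_alt data
  unfold parse parse_alt pvBlizzardsA pvWallsA
  rw [pv_outer]
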